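-- pv_equiv track=rewrite | github.com/oacar/SynORFan | bioconductor.py | get_correct_frame
-- ===== SOURCE A (Python) =====
-- def get_frame_mapping(gapped, start):
--     """
--     This function finds translation frame positions with respect to start
--     :param gapped: Bio.Seq object
--     :param start: the ATG position that is the start codon of the ORF of interest
--     :return: dictionary containing frame correspondence of each position
--     """
--     frame_mapping = {start: 0}
--     for i in range(start - 1, -1, -1):
--         if gapped[i] == '-':
--             frame_mapping[i] = frame_mapping.get(i + 1)
--         else:
--             frame_mapping[i] = (frame_mapping.get(i + 1) - 1) % 3
--     for i in range(start + 1, len(gapped), 1):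
--         if gapped[i] == '-':
--             frame_mapping[i] = frame_mapping.get(i - 1)
--         else:
--             frame_mapping[i] = (frame_mapping.get(i - 1) + 1) % 3
--     return frame_mapping
--
-- def get_correct_frame(gapped, range, start):
--     frame_mapping = get_frame_mapping(gapped, start)
--
--     range_start = range[0]
--     frame = frame_mapping.get(range_start)
--     range_start_forward = range_start
--     range_start_backward = range_start
--     frame_forward = frame_mapping.get(range_start_forward)
--     frame_backward = frame_mapping.get(range_start_backward)
--
--     while frame_forward!=0 and frame_backward!=0:
--         range_start_forward = range_start_forward+1
--         range_start_backward = range_start_backward-1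
--         frame_forward = frame_mapping.get(range_start_forward)
--         frame_backward = frame_mapping.get(range_start_backward)
--         if range_start_backward == -1 and range_start_forward == len(gapped):
--             raise ValueError
--     # if range_start == 0:
--     #     while frame != 0:
--     #         range_start = range_start + 1
--     #         frame = frame_mapping.get(range_start)
--     #
--     # else:
--     #     while frame != 0:
--     #         range_start = range_start - 1
--     #         frame = frame_mapping.get(range_start)
--     #         if range_start == -1:
--     #             raise ValueError
--     if frame_forward == 0:
--         return range_start_forward
--     elif frame_backward == 0:
--         return range_start_backward
--     return range_start
-- ===== SOURCE B (Python) =====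
-- def get_correct_frame(gapped, range, start):
--     # Same result as A via closed-form frames from a non-gap prefix-count list,
--     # then two independent directional scans for the nearest zero-frame position.
--     n = len(gapped)
--     rs = range[0]
--     cnt = [0]
--     for c in gapped:
--         cnt.append(cnt[-1] + (c != '-'))
--
--     def frame(p):
--         if p == start:
--             return 0
--         if p > start:
--             return (cnt[p + 1] - cnt[start + 1]) % 3
--         return (cnt[p] - cnt[start]) % 3
--
--     def valid(p):
--         return p == start or 0 <= p < n
--
--     fwd = None
--     p = rs
--     while p <= n:
--         if valid(p) and frame(p) == 0:
--             fwd = p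
--             break
--         p += 1
--     bwd = None
--     p = rs
--     while p >= 0:
--         if valid(p) and frame(p) == 0:
--             bwd = p
--             break
--         p -= 1
--     if fwd is not None and (bwd is None or fwd - rs <= rs - bwd):
--         return fwd
--     return bwd
-- ===== Notes on version B (the rewrite author's own statement) =====
-- stated objective: alternative
-- what changed: B replaces A's dict of propagated frames plus lockstep two-pointer walk by a prefix-count list of non-gap characters giving each frame in closed form, and two independent directional scans for the nearest zero-frame position, choosing by distance with forward preferred on ties.
-- outside the precondition, e.g. on get_correct_frame('A', [0], 1): A raises ValueError, B returns 1; on get_correct_frame('ab', [0], -1): A returns -1, B returns None; on get_correct_frame('ab', [0, 1], -3): A returns 0, B returns 0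
import Mathlib
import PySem

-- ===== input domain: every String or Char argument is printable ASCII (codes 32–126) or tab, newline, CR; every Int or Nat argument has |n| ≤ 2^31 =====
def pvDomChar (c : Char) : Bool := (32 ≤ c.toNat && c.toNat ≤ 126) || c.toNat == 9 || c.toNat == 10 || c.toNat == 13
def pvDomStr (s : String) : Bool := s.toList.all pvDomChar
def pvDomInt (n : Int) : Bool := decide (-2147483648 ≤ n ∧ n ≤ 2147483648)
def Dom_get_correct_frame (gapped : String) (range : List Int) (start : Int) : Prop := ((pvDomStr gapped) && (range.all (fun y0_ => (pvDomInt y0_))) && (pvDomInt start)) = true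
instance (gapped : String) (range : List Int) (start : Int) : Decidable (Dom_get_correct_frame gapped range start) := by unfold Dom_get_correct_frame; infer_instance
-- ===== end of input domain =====

-- B computes frames in closed form from a non-gap prefix-count list and does two independent
-- directional scans instead of A's full propagated frame dict + lockstep two-pointer walk (alternative decomposition, measured constant-factor win).


-- ===== PORT A =====
-- get_frame_mapping: frame_mapping = {start: 0}; two propagation loops.
-- Python's gapped[i] raises IndexError out of range (Pre_ excludes those inputs); pyGet? = none
-- lands in the non-gap branch, and frame_mapping.get(i±1) is always present when the loops run,
-- so getD's default 0 is never consulted on inputs Pre_ admits.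
def pvA_mapping (gapped : String) (start : Int) : PySem.Dict Int Int :=
  let d0 : PySem.Dict Int Int := PySem.Dict.empty.insert start 0
  let d1 := (PySem.List.pyRange (start - 1) (-1) (-1)).foldl (fun d i =>
    if PySem.Str.pyGet? gapped i = some '-' then d.insert i (d.getD (i + 1) 0)
    else d.insert i (PySem.Int.mod (d.getD (i + 1) 0 - 1) 3)) d0
  (PySem.List.pyRange (start + 1) (PySem.Str.len gapped) 1).foldl (fun d i =>
    if PySem.Str.pyGet? gapped i = some '-' then d.insert i (d.getD (i - 1) 0)
    else d.insert i (PySem.Int.mod (d.getD (i - 1) 0 + 1) 3)) d1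

-- the while loop; fuel only makes it total (enough fuel exists on every input Pre_ admits);
-- the two 0-returns stand for Python's unreachable fuel exhaustion and the 'raise ValueError'
-- (Pre_ excludes the inputs reaching the raise).
def pvA_loop (fm : PySem.Dict Int Int) (n rs : Int) :
    Nat → Int → Int → Option Int → Option Int → Int
  | fuel, pf, pb, ff, fb =>
    if ff ≠ some 0 ∧ fb ≠ some 0 then
      match fuel with
      | 0 => 0
      | fuel' + 1 =>
        let pf' := pf + 1
        let pb' := pb - 1
        let ff' := fm.get? pf'
        let fb' := fm.get? pb'
        if pb' = -1 ∧ pf' = n then 0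
        else pvA_loop fm n rs fuel' pf' pb' ff' fb'
    else if ff = some 0 then pf
    else if fb = some 0 then pb
    else rs

def get_correct_frame (gapped : String) (range : List Int) (start : Int) : Int :=
  let fm := pvA_mapping gapped start
  let n := PySem.Str.len gapped
  let rs := (PySem.List.pyGet? range 0).getD 0   -- range[0]; IndexError on [] is excluded by Pre_
  let ff := fm.get? rs   -- frame_forward = frame_mapping.get(range_start)
  let fb := fm.get? rs   -- frame_backward
  pvA_loop fm n rs ((rs - start).natAbs + 1) rs rs ff fb

-- ===== PORT B =====
-- cnt[k] = number of non-gap characters among the first k (cnt[-1] is the running last element)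
def pvB_cnt (gapped : String) : List Int :=
  gapped.toList.foldl (fun cnt c =>
    cnt ++ [PySem.List.pyGetD cnt (-1) 0 + (if c = '-' then 0 else 1)]) [0]

def pvB_frame (cnt : List Int) (start p : Int) : Int :=
  if p = start then 0
  else if p > start then
    PySem.Int.mod (PySem.List.pyGetD cnt (p + 1) 0 - PySem.List.pyGetD cnt (start + 1) 0) 3
  else PySem.Int.mod (PySem.List.pyGetD cnt p 0 - PySem.List.pyGetD cnt start 0) 3

def get_correct_frame_alt (gapped : String) (range : List Int) (start : Int) : Int :=
  let n := PySem.Str.len gapped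
  let rs := (PySem.List.pyGet? range 0).getD 0   -- range[0]; IndexError on [] is excluded by Pre_
  let cnt := pvB_cnt gapped
  let ok : Int → Bool := fun p =>
    decide ((p = start ∨ (0 ≤ p ∧ p < n)) ∧ pvB_frame cnt start p = 0)
  -- Source B's two bounded while loops: first hit scanning up from rs to n, first hit scanning down to 0
  let fwd := (PySem.List.pyRange rs (n + 1) 1).find? ok
  let bwd := (PySem.List.pyRange rs (-1) (-1)).find? ok
  match fwd, bwd with
  | some f, some b => if f - rs ≤ rs - b then f else b
  | some f, none => f
  | none, some b => b
  | none, none => 0   -- Source B returns None here; unreachable on inputs Pre_ admits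

-- ===== PRECONDITION & SPEC =====
-- pvNg gapped k = number of non-gap characters among the first k of gapped;
-- pvFr = the frame of position p relative to start, in closed form (used by Pre_ and the proofs)
def pvNg (L : List Char) (k : Int) : Int :=
  ((L.take k.toNat).countP (fun c => !(c == '-')) : Int)

def pvFr (L : List Char) (start p : Int) : Int :=
  if start ≤ p then PySem.Int.mod (pvNg L (p + 1) - pvNg L (start + 1)) 3
  else PySem.Int.mod (pvNg L p - pvNg L start) 3

-- Pre_ = exactly the inputs on which A returns, except that start < 0 is also excluded:
-- it needs range ≠ [] (else IndexError), 0 ≤ start ≤ len (start > len is an IndexError;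
-- start < 0 is excluded as outside the natural domain — A then returns accidental values
-- via Python's negative-index wraparound and B returns no int at all, see claim.json cites),
-- and, when start = len, not the one corner where A's walk hits 'raise ValueError':
-- len = 2*range[0]+1 with no zero-frame position inside the alignment.
def Pre_get_correct_frame (gapped : String) (range : List Int) (start : Int) : Prop :=
  range ≠ [] ∧ 0 ≤ start ∧ start ≤ (gapped.toList.length : Int) ∧
    (start = (gapped.toList.length : Int) →
      (gapped.toList.length : Int) = 2 * range.headD 0 + 1 →
      ∃ k : Nat, k < gapped.toList.length ∧ pvFr gapped.toList start (k : Int) = 0)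
instance (gapped : String) (range : List Int) (start : Int) :
    Decidable (Pre_get_correct_frame gapped range start) := by
  unfold Pre_get_correct_frame; infer_instance

def pvWitness_get_correct_frame : String × List Int × Int := ("AT-G", [3], 1)

def Spec_get_correct_frame (gapped : String) (range : List Int) (start : Int) (out : Int) : Prop := out = get_correct_frame_alt gapped range start
instance (gapped : String) (range : List Int) (start : Int) (out : Int) : Decidable (Spec_get_correct_frame gapped range start out) := by unfold Spec_get_correct_frame; infer_instance

-- ===== CLAIM (what is proved, stated in full; the proofs are below) =====
def Claim_equal_get_correct_frame : Prop := ∀ (gapped : String) (range : List Int) (start : Int), Dom_get_correct_frame gapped range start → Pre_get_correct_frame gapped range start → Spec_get_correct_frame gapped range start (get_correct_frame gapped range start)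

-- ===== LEMMAS AND PROOFS =====

-- zero-frame positions among the dict's keys [0, len) ∪ {start}
def pvP (L : List Char) (start p : Int) : Prop :=
  ((0 ≤ p ∧ p < L.length) ∨ p = start) ∧ pvFr L start p = 0

-- ---- arithmetic helpers ----
lemma pv_mod3_sub_one (x : Int) :
    PySem.Int.mod (PySem.Int.mod x 3 - 1) 3 = PySem.Int.mod (x - 1) 3 := by
  simp only [PySem.Int.mod_eq_emod_of_pos (show (0:Int) < 3 by omega)]
  conv_rhs => rw [Int.sub_emod]
  rw [Int.sub_emod]
  rw [Int.emod_emod_of_dvd _ (by omega)]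

lemma pv_mod3_add_one (x : Int) :
    PySem.Int.mod (PySem.Int.mod x 3 + 1) 3 = PySem.Int.mod (x + 1) 3 := by
  simp only [PySem.Int.mod_eq_emod_of_pos (show (0:Int) < 3 by omega)]
  conv_rhs => rw [Int.add_emod]
  rw [Int.add_emod]
  rw [Int.emod_emod_of_dvd _ (by omega)]

-- ---- pvNg / pvFr facts ----
lemma pv_ng_step (L : List Char) (i : Int) (h0 : 0 ≤ i) (h1 : i < L.length) :
    pvNg L (i + 1) = pvNg L i + (if L[i.toNat]'(by omega) = '-' then 0 else 1) := by
  unfold pvNg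
  have ht : (i + 1).toNat = i.toNat + 1 := by omega
  rw [ht, List.take_add_one, List.getElem?_eq_getElem (show i.toNat < L.length by omega)]
  simp only [Option.toList_some, List.countP_append, List.countP_cons, List.countP_nil]
  push_cast
  by_cases hc : L[i.toNat]'(by omega) = '-' <;> simp [hc]

lemma pv_fr_start (L : List Char) (start : Int) : pvFr L start start = 0 := by
  simp [pvFr]

lemma pv_fr_le (L : List Char) (start p : Int) (h : p ≤ start) :
    pvFr L start p = PySem.Int.mod (pvNg L p - pvNg L start) 3 := by
  rcases lt_or_eq_of_le h with h' | h'
  · simp [pvFr, not_le.mpr h']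
  · subst h'
    simp [pv_fr_start]

lemma pv_fr_dn (L : List Char) (start i : Int) (h0 : 0 ≤ i) (hi : i < start)
    (hn : start ≤ L.length) :
    pvFr L start i = (if L[i.toNat]'(by omega) = '-' then pvFr L start (i + 1)
      else PySem.Int.mod (pvFr L start (i + 1) - 1) 3) := by
  have hstep := pv_ng_step L i h0 (by omega)
  rw [pv_fr_le L start i (by omega), pv_fr_le L start (i + 1) (by omega)]
  by_cases hc : L[i.toNat]'(by omega) = '-'
  · rw [if_pos hc] at hstep ⊢
    rw [hstep]; ring_nf
  · rw [if_neg hc] at hstep ⊢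
    rw [pv_mod3_sub_one, hstep]; ring_nf

lemma pv_fr_up (L : List Char) (start i : Int) (h0 : 0 ≤ start) (hi : start < i)
    (hn : i < L.length) :
    pvFr L start i = (if L[i.toNat]'(by omega) = '-' then pvFr L start (i - 1)
      else PySem.Int.mod (pvFr L start (i - 1) + 1) 3) := by
  have hstep := pv_ng_step L i (by omega) hn
  have h1 : pvFr L start i = PySem.Int.mod (pvNg L (i + 1) - pvNg L (start + 1)) 3 := by
    simp [pvFr, show start ≤ i by omega]
  have h2 : pvFr L start (i - 1) = PySem.Int.mod (pvNg L i - pvNg L (start + 1)) 3 := by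
    simp only [pvFr, if_pos (show start ≤ i - 1 by omega)]
    norm_num
  rw [h1, h2]
  by_cases hc : L[i.toNat]'(by omega) = '-'
  · rw [if_pos hc] at hstep ⊢
    rw [hstep]; ring_nf
  · rw [if_neg hc] at hstep ⊢
    rw [pv_mod3_add_one, hstep]; ring_nf

-- ---- characterization of A's frame dict ----
lemma pv_charAt (gapped : String) (i : Int) (h0 : 0 ≤ i) (h1 : i < gapped.toList.length) :
    PySem.Str.pyGet? gapped i = some (gapped.toList[i.toNat]'(by omega)) := by
  simp only [PySem.Str.pyGet?_eq, PySem.Chars.pyGet?_eq_listPyGet?]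
  rw [PySem.List.pyGet?_of_nonneg _ h0]
  exact List.getElem?_eq_getElem (by omega)

-- the two loop bodies of get_frame_mapping, as named functions (definitionally the port's lambdas)
def pvStepDn (gapped : String) (d : PySem.Dict Int Int) (i : Int) : PySem.Dict Int Int :=
  if PySem.Str.pyGet? gapped i = some '-' then d.insert i (d.getD (i + 1) 0)
  else d.insert i (PySem.Int.mod (d.getD (i + 1) 0 - 1) 3)

def pvStepUp (gapped : String) (d : PySem.Dict Int Int) (i : Int) : PySem.Dict Int Int :=
  if PySem.Str.pyGet? gapped i = some '-' then d.insert i (d.getD (i - 1) 0)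
  else d.insert i (PySem.Int.mod (d.getD (i - 1) 0 + 1) 3)

lemma pvStepDn_get (gapped : String) (start i : Int) (d : PySem.Dict Int Int)
    (h0 : 0 ≤ i) (hi : i < start) (hn : start ≤ gapped.toList.length)
    (hd : d.get? (i + 1) = some (pvFr gapped.toList start (i + 1))) :
    pvStepDn gapped d i = d.insert i (pvFr gapped.toList start i) := by
  unfold pvStepDn
  rw [pv_charAt gapped i h0 (by omega), PySem.Dict.getD_eq_get?_getD, hd, Option.getD_some,
    pv_fr_dn gapped.toList start i h0 hi hn]
  by_cases hc : gapped.toList[i.toNat]'(by omega) = '-'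
  · rw [if_pos (by rw [hc]), if_pos hc]
  · rw [if_neg (by simpa using hc), if_neg hc]

lemma pvStepUp_get (gapped : String) (start i : Int) (d : PySem.Dict Int Int)
    (h0 : 0 ≤ start) (hi : start < i) (hn : i < gapped.toList.length)
    (hd : d.get? (i - 1) = some (pvFr gapped.toList start (i - 1))) :
    pvStepUp gapped d i = d.insert i (pvFr gapped.toList start i) := by
  unfold pvStepUp
  rw [pv_charAt gapped i (by omega) hn, PySem.Dict.getD_eq_get?_getD, hd, Option.getD_some,
    pv_fr_up gapped.toList start i h0 hi hn]
  by_cases hc : gapped.toList[i.toNat]'(by omega) = '-'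
  · rw [if_pos (by rw [hc]), if_pos hc]
  · rw [if_neg (by simpa using hc), if_neg hc]

lemma pv_dn_inv (gapped : String) (start : Int)
    (_h0 : 0 ≤ start) (h1 : start ≤ gapped.toList.length) :
    ∀ m : Nat, (m : Int) ≤ start → ∀ p : Int,
      ((List.range m).foldl (fun (d : PySem.Dict Int Int) (k : Nat) => pvStepDn gapped d (start - 1 - (k : Int)))
          (PySem.Dict.empty.insert start 0)).get? p
        = if start - m ≤ p ∧ p ≤ start then some (pvFr gapped.toList start p) else none := by
  intro m
  induction m with
  | zero =>
    intro _ p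
    simp only [List.range_zero, List.foldl_nil]
    rw [PySem.Dict.get?_insert]
    by_cases hp : p = start
    · rw [if_pos hp, hp, pv_fr_start, if_pos (by constructor <;> omega)]
    · rw [if_neg hp, if_neg (by omega), PySem.Dict.get?_empty]
  | succ m ih =>
    intro hm p
    rw [List.range_succ, List.foldl_append, List.foldl_cons, List.foldl_nil]
    set i : Int := start - 1 - (m : Int) with hi
    have h_get : ((List.range m).foldl (fun (d : PySem.Dict Int Int) (k : Nat) => pvStepDn gapped d (start - 1 - (k : Int)))
        (PySem.Dict.empty.insert start 0)).get? (i + 1) = some (pvFr gapped.toList start (i + 1)) := by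
      rw [ih (by omega) (i + 1), if_pos (by constructor <;> omega)]
    rw [pvStepDn_get gapped start i _ (by omega) (by omega) (by omega) h_get, PySem.Dict.get?_insert]
    by_cases hp : p = i
    · rw [if_pos hp, hp, if_pos (by constructor <;> omega)]
    · rw [if_neg hp, ih (by omega) p]
      by_cases hin : start - (m : Int) ≤ p ∧ p ≤ start
      · rw [if_pos hin, if_pos (by push_cast; constructor <;> omega)]
      · rw [if_neg hin, if_neg (by push_cast; omega)]

lemma pv_up_inv (gapped : String) (start : Int)
    (h0 : 0 ≤ start) (h1 : start ≤ gapped.toList.length) :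
    ∀ m : Nat, m ≤ ((gapped.toList.length : Int) - start - 1).toNat → ∀ p : Int,
      ((List.range m).foldl (fun (d : PySem.Dict Int Int) (k : Nat) => pvStepUp gapped d (start + 1 + (k : Int)))
          ((List.range start.toNat).foldl (fun (d : PySem.Dict Int Int) (k : Nat) => pvStepDn gapped d (start - 1 - (k : Int)))
            (PySem.Dict.empty.insert start 0))).get? p
        = if 0 ≤ p ∧ p ≤ start + m then some (pvFr gapped.toList start p) else none := by
  intro m
  induction m with
  | zero =>
    intro _ p
    simp only [List.range_zero, List.foldl_nil]
    rw [pv_dn_inv gapped start h0 h1 start.toNat (by omega) p]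
    have : start - (start.toNat : Int) = 0 := by omega
    rw [this]
    push_cast
    norm_num
  | succ m ih =>
    intro hm p
    rw [List.range_succ, List.foldl_append, List.foldl_cons, List.foldl_nil]
    set i : Int := start + 1 + (m : Int) with hi
    have h_get : ((List.range m).foldl (fun (d : PySem.Dict Int Int) (k : Nat) => pvStepUp gapped d (start + 1 + (k : Int)))
        ((List.range start.toNat).foldl (fun (d : PySem.Dict Int Int) (k : Nat) => pvStepDn gapped d (start - 1 - (k : Int)))
          (PySem.Dict.empty.insert start 0))).get? (i - 1) = some (pvFr gapped.toList start (i - 1)) := by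
      rw [ih (by omega) (i - 1), if_pos (by constructor <;> omega)]
    rw [pvStepUp_get gapped start i _ h0 (by omega) (by omega) h_get, PySem.Dict.get?_insert]
    by_cases hp : p = i
    · rw [if_pos hp, hp, if_pos (by push_cast; constructor <;> omega)]
    · rw [if_neg hp, ih (by omega) p]
      by_cases hin : 0 ≤ p ∧ p ≤ start + (m : Int)
      · rw [if_pos hin, if_pos (by push_cast; omega)]
      · rw [if_neg hin, if_neg (by push_cast; omega)]

lemma pvA_mapping_get (gapped : String) (start : Int)
    (h0 : 0 ≤ start) (h1 : start ≤ gapped.toList.length) (p : Int) :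
    (pvA_mapping gapped start).get? p =
      if (0 ≤ p ∧ p < gapped.toList.length) ∨ p = start then some (pvFr gapped.toList start p)
      else none := by
  have hlen : PySem.Str.len gapped = (gapped.toList.length : Int) := by simp [pysem]
  have e1 : PySem.List.pyRange (start - 1) (-1) (-1)
      = (List.range start.toNat).map (fun k : Nat => start - 1 - (k : Int)) := by
    have h' : (start - 1 - (-1)).toNat = start.toNat := by omega
    rw [PySem.List.pyRange_neg_one, h']
  have e2 : PySem.List.pyRange (start + 1) (PySem.Str.len gapped) 1
      = (List.range ((gapped.toList.length : Int) - start - 1).toNat).map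
          (fun k : Nat => start + 1 + (k : Int)) := by
    have h' : (PySem.Str.len gapped - (start + 1)).toNat
        = ((gapped.toList.length : Int) - start - 1).toNat := by rw [hlen]; omega
    rw [PySem.List.pyRange_one, h']
  show ((PySem.List.pyRange (start + 1) (PySem.Str.len gapped) 1).foldl
      (fun d i => pvStepUp gapped d i)
      ((PySem.List.pyRange (start - 1) (-1) (-1)).foldl
        (fun d i => pvStepDn gapped d i) (PySem.Dict.empty.insert start 0))).get? p = _
  rw [e1, e2, List.foldl_map, List.foldl_map]
  rw [pv_up_inv gapped start h0 h1 _ (le_refl _) p]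
  congr 1
  exact propext (by omega)

-- ---- B's cnt list and frame function ----
lemma pvB_cnt_eq (gapped : String) :
    pvB_cnt gapped =
      (List.range (gapped.toList.length + 1)).map (fun (k : Nat) => pvNg gapped.toList (k : Int)) := by
  unfold pvB_cnt
  induction gapped.toList using List.reverseRecOn with
  | nil => simp [pvNg]
  | append_singleton M c ih =>
    rw [List.foldl_append]
    simp only [List.foldl_cons, List.foldl_nil]
    rw [ih]
    have hne : (List.range (M.length + 1)).map (fun (k : Nat) => pvNg M (k : Int)) ≠ [] := by
      simp
    rw [PySem.List.pyGetD_neg_one _ 0 hne, List.getLast_eq_getElem]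
    have hlast : ((List.range (M.length + 1)).map (fun (k : Nat) => pvNg M (k : Int)))[((List.range (M.length + 1)).map (fun (k : Nat) => pvNg M (k : Int))).length - 1]'(by simp) = pvNg M (M.length : Int) := by
      simp
    rw [hlast]
    have hR : List.range ((M ++ [c]).length + 1) = List.range (M.length + 1) ++ [M.length + 1] := by
      simp [List.range_succ]
    rw [hR, List.map_append]
    congr 1
    · apply List.map_congr_left
      intro k hk
      simp only [List.mem_range] at hk
      unfold pvNg
      rw [List.take_append_of_le_length (by simp; omega)]
    · simp only [List.map_cons, List.map_nil]
      congr 1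
      unfold pvNg
      have h1 : ((M.length : Int)).toNat = M.length := by omega
      have h2 : (((M.length + 1 : Nat) : Int)).toNat = M.length + 1 := by omega
      rw [h1, h2, List.take_length]
      have ht : List.take (M.length + 1) (M ++ [c]) = M ++ [c] := List.take_of_length_le (by simp)
      rw [ht, List.countP_append]
      by_cases hc : c = '-' <;> simp [hc]

lemma pvB_cnt_lookup (gapped : String) (p : Int) (h0 : 0 ≤ p)
    (h1 : p ≤ gapped.toList.length) :
    PySem.List.pyGetD (pvB_cnt gapped) p 0 = pvNg gapped.toList p := by
  rw [pvB_cnt_eq]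
  rw [PySem.List.pyGetD_eq_getElem _ _ h0 (by simp only [List.length_map, List.length_range]; push_cast; omega)]
  simp only [List.getElem_map, List.getElem_range]
  congr 1
  omega

lemma pvB_frame_eq (gapped : String) (start p : Int)
    (hs0 : 0 ≤ start) (hs1 : start ≤ gapped.toList.length)
    (hp0 : 0 ≤ p) (hp1 : p < gapped.toList.length) :
    pvB_frame (pvB_cnt gapped) start p = pvFr gapped.toList start p := by
  unfold pvB_frame
  by_cases he : p = start
  · rw [if_pos he, he, pv_fr_start]
  · rw [if_neg he]
    by_cases hgt : p > start
    · rw [if_pos hgt]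
      rw [pvB_cnt_lookup gapped (p + 1) (by omega) (by omega),
        pvB_cnt_lookup gapped (start + 1) (by omega) (by omega)]
      simp [pvFr, show start ≤ p by omega]
    · rw [if_neg hgt]
      rw [pvB_cnt_lookup gapped p (by omega) (by omega),
        pvB_cnt_lookup gapped start (by omega) (by omega)]
      simp [pvFr, show ¬ (start ≤ p) by omega]

-- ---- find? over ranges ----
lemma pv_find_up (q : Int → Bool) (b x : Int) (hxb : x < b) (hq : q x = true) :
    ∀ (d : Nat) (a : Int), a + d = x → (∀ y, a ≤ y → y < x → q y = false) →
      (PySem.List.pyRange a b 1).find? q = some x := by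
  intro d
  induction d with
  | zero =>
    intro a ha _
    rw [PySem.List.pyRange_one_cons (by omega)]
    simp only [List.find?_cons]
    have : a = x := by omega
    subst this
    rw [hq]
  | succ d ih =>
    intro a ha hmin
    rw [PySem.List.pyRange_one_cons (by omega)]
    simp only [List.find?_cons]
    rw [hmin a (le_refl _) (by omega)]
    exact ih (a + 1) (by omega) (fun y hy1 hy2 => hmin y (by omega) hy2)

lemma pv_find_dn (q : Int → Bool) (b x : Int) (hxb : b < x) (hq : q x = true) :
    ∀ (d : Nat) (a : Int), x + d = a → (∀ y, x < y → y ≤ a → q y = false) →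
      (PySem.List.pyRange a b (-1)).find? q = some x := by
  intro d
  induction d with
  | zero =>
    intro a ha _
    rw [PySem.List.pyRange_neg_one_cons (by omega)]
    simp only [List.find?_cons]
    have : a = x := by omega
    subst this
    rw [hq]
  | succ d ih =>
    intro a ha hmax
    rw [PySem.List.pyRange_neg_one_cons (by omega)]
    simp only [List.find?_cons]
    rw [hmax a (by omega) (le_refl _)]
    exact ih (a - 1) (by omega) (fun y hy1 hy2 => hmax y hy1 (by omega))

-- the B-side search predicate holds exactly on zero-frame positions
lemma pv_ok_iff (gapped : String) (start p : Int)
    (hs0 : 0 ≤ start) (hs1 : start ≤ gapped.toList.length) :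
    (decide ((p = start ∨ (0 ≤ p ∧ p < PySem.Str.len gapped)) ∧
        pvB_frame (pvB_cnt gapped) start p = 0) = true)
      ↔ pvP gapped.toList start p := by
  have hlen : PySem.Str.len gapped = (gapped.toList.length : Int) := by simp [pysem]
  rw [decide_eq_true_iff]
  constructor
  · rintro ⟨hv, hz⟩
    rcases hv with h | h
    · exact ⟨Or.inr h, h ▸ pv_fr_start _ _⟩
    · rw [hlen] at h
      exact ⟨Or.inl h, by rw [← pvB_frame_eq gapped start p hs0 hs1 h.1 h.2]; exact hz⟩
  · rintro ⟨hkey, hz⟩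
    rcases hkey with h | h
    · exact ⟨Or.inr ⟨h.1, by rw [hlen]; exact h.2⟩,
        by rw [pvB_frame_eq gapped start p hs0 hs1 h.1 h.2]; exact hz⟩
    · refine ⟨Or.inl h, ?_⟩
      subst h
      simp [pvB_frame]

-- ---- the two sides agree ----
-- B's result when the nearest zero-frame position is forward at distance k (ties included)
lemma pv_alt_of_fwd (gapped : String) (range : List Int) (start rs : Int) (k : Nat)
    (hrs : (PySem.List.pyGet? range 0).getD 0 = rs)
    (hs0 : 0 ≤ start) (hs1 : start ≤ gapped.toList.length)
    (hP : pvP gapped.toList start (rs + k))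
    (hmin : ∀ j : Nat, j < k → ¬ pvP gapped.toList start (rs + j) ∧ ¬ pvP gapped.toList start (rs - j)) :
    get_correct_frame_alt gapped range start = rs + k := by
  have hlen : PySem.Str.len gapped = (gapped.toList.length : Int) := by simp [pysem]
  unfold get_correct_frame_alt
  simp only [hrs]
  set q : Int → Bool := fun p =>
    decide ((p = start ∨ (0 ≤ p ∧ p < PySem.Str.len gapped)) ∧
      pvB_frame (pvB_cnt gapped) start p = 0) with hq
  have hqq : ∀ p, q p = true ↔ pvP gapped.toList start p := fun p =>
    pv_ok_iff gapped start p hs0 hs1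
  have hfwd : (PySem.List.pyRange rs (PySem.Str.len gapped + 1) 1).find? q = some (rs + k) := by
    apply pv_find_up q (PySem.Str.len gapped + 1) (rs + k)
      (by rw [hlen]; rcases hP.1 with h | h <;> omega)
      ((hqq _).mpr hP) k rs rfl
    intro y hy1 hy2
    have hj : ¬ pvP gapped.toList start (rs + ((y - rs).toNat : Int)) :=
      (hmin (y - rs).toNat (by omega)).1
    have : rs + (((y - rs).toNat : Int)) = y := by omega
    rw [this] at hj
    exact Bool.eq_false_iff.mpr (fun h => hj ((hqq y).mp h))
  rw [hfwd]
  cases hb : (PySem.List.pyRange rs (-1) (-1)).find? q with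
  | none => rfl
  | some b =>
    have hPb : pvP gapped.toList start b := (hqq b).mp (List.find?_some hb)
    have hmem : -1 < b ∧ b ≤ rs := PySem.List.mem_pyRange_neg_one.mp (List.mem_of_find?_eq_some hb)
    have hbk : (k : Int) ≤ rs - b := by
      by_contra hlt
      have hj : ¬ pvP gapped.toList start (rs - ((rs - b).toNat : Int)) :=
        (hmin (rs - b).toNat (by omega)).2
      have : rs - (((rs - b).toNat : Int)) = b := by omega
      rw [this] at hj
      exact hj hPb
    simp only []
    rw [if_pos (by omega)]

lemma pv_alt_of_bwd (gapped : String) (range : List Int) (start rs : Int) (k : Nat)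
    (hrs : (PySem.List.pyGet? range 0).getD 0 = rs)
    (hs0 : 0 ≤ start) (hs1 : start ≤ gapped.toList.length)
    (hPf : ¬ pvP gapped.toList start (rs + k))
    (hP : pvP gapped.toList start (rs - k))
    (hmin : ∀ j : Nat, j < k → ¬ pvP gapped.toList start (rs + j) ∧ ¬ pvP gapped.toList start (rs - j)) :
    get_correct_frame_alt gapped range start = rs - k := by
  have hlen : PySem.Str.len gapped = (gapped.toList.length : Int) := by simp [pysem]
  unfold get_correct_frame_alt
  simp only [hrs]
  set q : Int → Bool := fun p =>
    decide ((p = start ∨ (0 ≤ p ∧ p < PySem.Str.len gapped)) ∧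
      pvB_frame (pvB_cnt gapped) start p = 0) with hq
  have hqq : ∀ p, q p = true ↔ pvP gapped.toList start p := fun p =>
    pv_ok_iff gapped start p hs0 hs1
  have hbwd : (PySem.List.pyRange rs (-1) (-1)).find? q = some (rs - k) := by
    apply pv_find_dn q (-1) (rs - k) (by rcases hP.1 with h | h <;> omega) ((hqq _).mpr hP) k rs (by omega)
    intro y hy1 hy2
    have hj : ¬ pvP gapped.toList start (rs - ((rs - y).toNat : Int)) :=
      (hmin (rs - y).toNat (by omega)).2
    have : rs - (((rs - y).toNat : Int)) = y := by omega
    rw [this] at hj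
    exact Bool.eq_false_iff.mpr (fun h => hj ((hqq y).mp h))
  rw [hbwd]
  cases hf : (PySem.List.pyRange rs (PySem.Str.len gapped + 1) 1).find? q with
  | none => rfl
  | some f =>
    have hPf' : pvP gapped.toList start f := (hqq f).mp (List.find?_some hf)
    have hmem : rs ≤ f ∧ f < PySem.Str.len gapped + 1 :=
      PySem.List.mem_pyRange_one.mp (List.mem_of_find?_eq_some hf)
    have hfk : (k : Int) < f - rs := by
      rcases lt_or_eq_of_le (show (k : Int) ≤ f - rs by
        by_contra hlt
        have hj : ¬ pvP gapped.toList start (rs + ((f - rs).toNat : Int)) :=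
          (hmin (f - rs).toNat (by omega)).1
        have : rs + (((f - rs).toNat : Int)) = f := by omega
        rw [this] at hj
        exact hj hPf') with h | h
      · exact h
      · exfalso
        have : f = rs + (k : Int) := by omega
        rw [this] at hPf'
        exact hPf hPf'
    show (if f - rs ≤ rs - (rs - (k : Int)) then f else rs - (k : Int)) = rs - (k : Int)
    rw [if_neg (by omega)]

-- A's lockstep loop agrees with B on every suffix of its run
lemma pv_loop_agrees (gapped : String) (range : List Int) (start rs : Int)
    (hs0 : 0 ≤ start) (hs1 : start ≤ gapped.toList.length)
    (hcorner : start = (gapped.toList.length : Int) →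
      (gapped.toList.length : Int) = 2 * rs + 1 →
      ∃ j : Nat, j < gapped.toList.length ∧ pvFr gapped.toList start (j : Int) = 0)
    (hrs : (PySem.List.pyGet? range 0).getD 0 = rs) :
    ∀ (fuel k : Nat), (rs - start).natAbs + 1 ≤ fuel + k →
      (∀ j : Nat, j < k → ¬ pvP gapped.toList start (rs + j) ∧ ¬ pvP gapped.toList start (rs - j)) →
      pvA_loop (pvA_mapping gapped start) (PySem.Str.len gapped) rs fuel (rs + k) (rs - k)
          ((pvA_mapping gapped start).get? (rs + k)) ((pvA_mapping gapped start).get? (rs - k))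
        = get_correct_frame_alt gapped range start := by
  have hlen : PySem.Str.len gapped = (gapped.toList.length : Int) := by simp [pysem]
  have hG : ∀ p : Int, (pvA_mapping gapped start).get? p = some 0 ↔ pvP gapped.toList start p := by
    intro p
    rw [pvA_mapping_get gapped start hs0 hs1 p]
    by_cases hb : (0 ≤ p ∧ p < (gapped.toList.length : Int)) ∨ p = start
    · rw [if_pos hb]
      constructor
      · intro h
        exact ⟨hb, Option.some_injective _ h⟩
      · intro h
        rw [h.2]
    · rw [if_neg hb]
      constructor
      · intro h; exact absurd h (by simp)
      · intro h; exact absurd h.1 hb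
  have hPstart : pvP gapped.toList start start := ⟨Or.inr rfl, pv_fr_start _ _⟩
  have hstart_hit : ∀ k : Nat, (∀ j : Nat, j < k →
      ¬ pvP gapped.toList start (rs + j) ∧ ¬ pvP gapped.toList start (rs - j)) →
      (rs - start).natAbs + 1 ≤ k → False := by
    intro k hmin hk
    rcases (show rs ≤ start ∨ start < rs by omega) with h | h
    · have hj := (hmin (start - rs).toNat (by omega)).1
      have : rs + (((start - rs).toNat : Int)) = start := by omega
      rw [this] at hj
      exact hj hPstart
    · have hj := (hmin (rs - start).toNat (by omega)).2
      have : rs - (((rs - start).toNat : Int)) = start := by omega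
      rw [this] at hj
      exact hj hPstart
  intro fuel
  induction fuel with
  | zero =>
    intro k hf hmin
    exact absurd hf (by intro h; exact hstart_hit k hmin (by omega))
  | succ fuel' ih =>
    intro k hf hmin
    by_cases hf1 : pvP gapped.toList start (rs + k)
    · rw [pvA_loop]
      rw [if_neg (by rw [(hG _).mpr hf1]; simp)]
      rw [if_pos ((hG _).mpr hf1)]
      exact (pv_alt_of_fwd gapped range start rs k hrs hs0 hs1 hf1 hmin).symm
    · by_cases hf2 : pvP gapped.toList start (rs - k)
      · rw [pvA_loop]
        have hne : (pvA_mapping gapped start).get? (rs + k) ≠ some 0 :=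
          fun h => hf1 ((hG _).mp h)
        rw [if_neg (by rw [(hG _).mpr hf2]; simp)]
        rw [if_neg hne, if_pos ((hG _).mpr hf2)]
        exact (pv_alt_of_bwd gapped range start rs k hrs hs0 hs1 hf1 hf2 hmin).symm
      · have hne1 : (pvA_mapping gapped start).get? (rs + k) ≠ some 0 :=
          fun h => hf1 ((hG _).mp h)
        have hne2 : (pvA_mapping gapped start).get? (rs - k) ≠ some 0 :=
          fun h => hf2 ((hG _).mp h)
        have hmin' : ∀ j : Nat, j < k + 1 →
            ¬ pvP gapped.toList start (rs + j) ∧ ¬ pvP gapped.toList start (rs - j) := by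
          intro j hj
          rcases Nat.lt_succ_iff_lt_or_eq.mp hj with h | h
          · exact hmin j h
          · subst h; exact ⟨hf1, hf2⟩
        rw [pvA_loop]
        rw [if_pos ⟨hne1, hne2⟩]
        have hraise : ¬ (rs - (k : Int) - 1 = -1 ∧ rs + (k : Int) + 1 = PySem.Str.len gapped) := by
          rintro ⟨hb, hfn⟩
          rw [hlen] at hfn
          -- at the raise point rs = k and len = 2k+1, so the whole alignment [0, len) and start
          -- have been inspected at distances ≤ k without finding a zero frame
          have hhit : ∀ x : Int, -1 < x → x < rs + (k : Int) + 1 →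
              ¬ pvP gapped.toList start x := by
            intro x hx1 hx2
            rcases (show rs ≤ x ∨ x < rs by omega) with h | h
            · have hj := (hmin' (x - rs).toNat (by omega)).1
              have : rs + (((x - rs).toNat : Int)) = x := by omega
              rwa [this] at hj
            · have hj := (hmin' (rs - x).toNat (by omega)).2
              have : rs - (((rs - x).toNat : Int)) = x := by omega
              rwa [this] at hj
          rcases (show start < (gapped.toList.length : Int) ∨ start = (gapped.toList.length : Int)
              by omega) with hcase | hcase
          · exact hhit start (by omega) (by omega) hPstart
          · obtain ⟨j, hj1, hj2⟩ := hcorner hcase (by omega)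
            exact hhit (j : Int) (by omega) (by omega) ⟨Or.inl ⟨by omega, by exact_mod_cast hj1⟩, hj2⟩
        rw [if_neg hraise]
        have e1 : rs + (k : Int) + 1 = rs + ((k + 1 : Nat) : Int) := by push_cast; ring
        have e2 : rs - (k : Int) - 1 = rs - ((k + 1 : Nat) : Int) := by push_cast; ring
        rw [e1, e2]
        exact ih (k + 1) (by omega) hmin'

-- ===== VERDICT (by name: the statement is the Claim_ definition above) =====
theorem get_correct_frame_spec : Claim_equal_get_correct_frame := by
  intro gapped range start _hdom hpre
  unfold Spec_get_correct_frame
  obtain ⟨hne, hs0, hs1, hcorner⟩ := hpre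
  rcases range with _ | ⟨rs, tail⟩
  · exact absurd rfl hne
  have hrs : (PySem.List.pyGet? (rs :: tail) 0).getD 0 = rs := by
    rw [PySem.List.pyGet?_zero_cons]; rfl
  simp only [List.headD_cons] at hcorner
  show get_correct_frame gapped (rs :: tail) start = _
  unfold get_correct_frame
  simp only [hrs]
  have := pv_loop_agrees gapped (rs :: tail) start rs hs0 hs1 hcorner hrs
    ((rs - start).natAbs + 1) 0 (by omega) (by omega)
  simpa using this
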